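-- pv_equiv track=rewrite | github.com/dayForJames/boolean_search_hw_framework | hw_boolean_search.py | and_split
-- ===== SOURCE A (Python) =====
-- def and_split(tokens: list) -> list:
--     splits = []
--
--     first_pos = 0
--     ind = 0
--
--     brack_balance = 0
--
--     while ind < len(tokens):
--         if tokens[ind] == "(":
--
--             brack_balance += 1
--             ind += 1
--
--         elif tokens[ind] == ")":
--             brack_balance -= 1
--             ind += 1
--
--         elif tokens[ind] == " " and (brack_balance == 0):
--             splits.append(tokens[first_pos:ind])
--             first_pos = ind + 1
--             ind += 1
--
--         elif tokens[ind] == "|":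
--             ind += 1
--
--         else:
--             ind += 1
--             pass  # we don't make splits insidde
--
--     splits.append(tokens[first_pos:ind])
--
--     return splits
-- ===== SOURCE B (Python) =====
-- def and_split(tokens: list) -> list:
--     # str.split-style: repeatedly find the first top-level separator of the
--     # remainder, slice off the head segment, and restart on the rest.
--     # Restarting the balance at 0 is valid: at every cut the balance is 0.
--     def first_cut(ts):
--         bal = 0
--         for i, t in enumerate(ts):
--             if t == "(":
--                 bal += 1
--             elif t == ")":
--                 bal -= 1
--             elif t == " " and bal == 0:
--                 return i
--         return None
--
--     res = []
--     rest = tokens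
--     while True:
--         i = first_cut(rest)
--         if i is None:
--             res.append(rest)
--             return res
--         res.append(rest[:i])
--         rest = rest[i + 1:]
-- ===== Notes on version B (the rewrite author's own statement) =====
-- stated objective: alternative
-- what changed: Replaces A's single interleaved while-loop carrying a rolling start index and a balance across the whole list by a str.split-style outer loop that repeatedly finds the FIRST top-level separator of the remainder, slices off the head segment, and restarts the balance scan at 0 on the rest (valid because the balance is 0 at every cut).
import Mathlib
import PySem

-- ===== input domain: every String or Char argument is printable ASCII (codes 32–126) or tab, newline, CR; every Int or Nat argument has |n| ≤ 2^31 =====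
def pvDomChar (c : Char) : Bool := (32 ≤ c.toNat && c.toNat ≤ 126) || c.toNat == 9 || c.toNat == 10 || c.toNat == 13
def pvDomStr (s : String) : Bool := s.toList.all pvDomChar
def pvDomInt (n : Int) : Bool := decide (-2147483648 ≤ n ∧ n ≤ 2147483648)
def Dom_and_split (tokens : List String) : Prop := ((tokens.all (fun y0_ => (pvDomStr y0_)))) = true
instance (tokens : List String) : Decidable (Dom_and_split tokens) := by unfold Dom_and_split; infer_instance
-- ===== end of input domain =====

-- B replaces A's single rolling-index pass by a str.split-style loop: repeatedly find the
-- first top-level separator of the remainder, slice off the head segment, restart on the rest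
-- (alternative decomposition, same cost up to remainder copies).


-- ===== PORT A =====
-- A's while-loop: state (ind, first_pos, brack_balance, splits)
def and_split_go (tokens : List String) (ind first_pos : Nat) (bal : Int)
    (splits : List (List String)) : List (List String) :=
  if h : ind < tokens.length then
    if tokens[ind] = "(" then
      and_split_go tokens (ind + 1) first_pos (bal + 1) splits
    else if tokens[ind] = ")" then
      and_split_go tokens (ind + 1) first_pos (bal - 1) splits
    else if tokens[ind] = " " ∧ bal = 0 then
      and_split_go tokens (ind + 1) (ind + 1) bal
        (splits ++ [PySem.List.slice tokens (some (first_pos : Int)) (some (ind : Int))])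
    else if tokens[ind] = "|" then
      and_split_go tokens (ind + 1) first_pos bal splits
    else
      and_split_go tokens (ind + 1) first_pos bal splits
  else
    splits ++ [PySem.List.slice tokens (some (first_pos : Int)) (some (ind : Int))]
termination_by tokens.length - ind

def and_split (tokens : List String) : List (List String) :=
  and_split_go tokens 0 0 0 []

-- ===== PORT B =====
-- Source B's first_cut: scan ts with enumerate index i and balance bal, return first top-level ' '
def firstCut_go (ts : List String) (bal : Int) (i : Nat) : Option Nat :=
  match ts with
  | [] => none
  | t :: ts' =>
    if t = "(" then firstCut_go ts' (bal + 1) (i + 1)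
    else if t = ")" then firstCut_go ts' (bal - 1) (i + 1)
    else if t = " " ∧ bal = 0 then some i
    else firstCut_go ts' bal (i + 1)

def firstCut (ts : List String) : Option Nat := firstCut_go ts 0 0

-- termination fact for Source B's outer loop (used by decreasing_by below)
theorem firstCut_go_lt (ts : List String) : ∀ (bal : Int) (i j : Nat),
    firstCut_go ts bal i = some j → i ≤ j ∧ j - i < ts.length := by
  induction ts with
  | nil => intro bal i j h; simp [firstCut_go] at h
  | cons t ts ih =>
    intro bal i j h
    simp only [firstCut_go] at h
    split_ifs at h with h1 h2 h3
    · have := ih (bal + 1) (i + 1) j h; simp only [List.length_cons]; omega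
    · have := ih (bal - 1) (i + 1) j h; simp only [List.length_cons]; omega
    · cases h; simp only [List.length_cons]; omega
    · have := ih bal (i + 1) j h; simp only [List.length_cons]; omega

-- Source B's outer while-loop on (rest, res)
def and_split_alt_go (rest : List String) (res : List (List String)) : List (List String) :=
  match hfc : firstCut rest with
  | none => res ++ [rest]
  | some i =>
    and_split_alt_go (PySem.List.slice rest (some ((i : Int) + 1)) none)
      (res ++ [PySem.List.slice rest none (some (i : Int))])
termination_by rest.length
decreasing_by
  have h := firstCut_go_lt rest 0 0 i hfc
  have : ((i : Int) + 1) = ((i + 1 : Nat) : Int) := by push_cast; ring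
  rw [this, PySem.List.slice_from_natCast]
  simp only [List.length_drop]
  omega

def and_split_alt (tokens : List String) : List (List String) :=
  and_split_alt_go tokens []

-- ===== PRECONDITION & SPEC =====
def Spec_and_split (tokens : List String) (out : List (List String)) : Prop := out = and_split_alt tokens
instance (tokens : List String) (out : List (List String)) : Decidable (Spec_and_split tokens out) := by unfold Spec_and_split; infer_instance

-- ===== CLAIM (what is proved, stated in full; the proofs are below) =====
def Claim_equal_and_split : Prop := ∀ (tokens : List String), Dom_and_split tokens → Spec_and_split tokens (and_split tokens)

-- ===== LEMMAS AND PROOFS =====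

-- canonical recursive spec of the splitting: segments of ts scanned with balance bal
def consHead (t : String) : List (List String) → List (List String)
  | [] => [[t]]
  | s :: r => (t :: s) :: r

def segSpec : List String → Int → List (List String)
  | [], _ => [[]]
  | t :: ts, bal =>
    if t = "(" then consHead t (segSpec ts (bal + 1))
    else if t = ")" then consHead t (segSpec ts (bal - 1))
    else if t = " " ∧ bal = 0 then [] :: segSpec ts bal
    else consHead t (segSpec ts bal)

-- prefix the first segment
def consSeg (p : List String) : List (List String) → List (List String)
  | [] => [p]
  | s :: r => (p ++ s) :: r

lemma consSeg_consHead (p : List String) (t : String) (l : List (List String)) :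
    consSeg p (consHead t l) = consSeg (p ++ [t]) l := by
  cases l <;> simp [consSeg, consHead]

lemma consHead_ne_nil (t : String) (l : List (List String)) : consHead t l ≠ [] := by
  cases l <;> simp [consHead]

lemma segSpec_ne_nil (ts : List String) (bal : Int) : segSpec ts bal ≠ [] := by
  cases ts with
  | nil => simp [segSpec]
  | cons t ts =>
    simp only [segSpec]
    split_ifs <;> first | exact consHead_ne_nil _ _ | simp

lemma consSeg_nil (l : List (List String)) (h : l ≠ []) : consSeg [] l = l := by
  cases l with
  | nil => exact absurd rfl h
  | cons s r => simp [consSeg]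

-- A equals the canonical spec
lemma and_split_go_eq (tokens : List String) :
    ∀ n ind fp bal splits, tokens.length - ind ≤ n → fp ≤ ind → ind ≤ tokens.length →
      and_split_go tokens ind fp bal splits
        = splits ++ consSeg (PySem.List.slice tokens (some (fp : Int)) (some (ind : Int)))
            (segSpec (tokens.drop ind) bal) := by
  intro n
  induction n with
  | zero =>
    intro ind fp bal splits hn hfp hle
    have hind : ind = tokens.length := by omega
    rw [and_split_go]
    simp only [hind, lt_irrefl, dif_neg, not_false_iff]
    simp [List.drop_of_length_le, segSpec, consSeg]
  | succ n ih =>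
    intro ind fp bal splits hn hfp hle
    by_cases h : ind < tokens.length
    · have hdrop : tokens.drop ind = tokens[ind] :: tokens.drop (ind + 1) :=
        List.drop_eq_getElem_cons h
      have hslice : PySem.List.slice tokens (some (fp : Int)) (some ((ind + 1 : Nat) : Int))
          = PySem.List.slice tokens (some (fp : Int)) (some (ind : Int)) ++ [tokens[ind]] := by
        rw [PySem.List.slice_natCast, PySem.List.slice_natCast]
        rw [show ind + 1 - fp = (ind - fp) + 1 by omega]
        rw [List.take_succ]
        congr 1
        simp only [List.getElem?_drop]
        rw [show fp + (ind - fp) = ind by omega]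
        simp [h]
      rw [and_split_go]
      simp only [dif_pos h, hdrop, segSpec]
      split_ifs with h1 h2 h3 h4
      · rw [ih (ind + 1) fp (bal + 1) splits (by omega) (by omega) (by omega),
          consSeg_consHead, ← hslice]
      · rw [ih (ind + 1) fp (bal - 1) splits (by omega) (by omega) (by omega),
          consSeg_consHead, ← hslice]
      · rw [ih (ind + 1) (ind + 1) bal _ (by omega) (le_refl _) (by omega)]
        have hempty : PySem.List.slice tokens (some ((ind + 1 : Nat) : Int))
            (some ((ind + 1 : Nat) : Int)) = [] := by
          rw [PySem.List.slice_natCast]; simp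
        rw [hempty, consSeg_nil _ (segSpec_ne_nil _ _)]
        cases hseg : segSpec (tokens.drop (ind + 1)) bal with
        | nil => exact absurd hseg (segSpec_ne_nil _ _)
        | cons s r => simp [consSeg]
      · rw [ih (ind + 1) fp bal splits (by omega) (by omega) (by omega),
          consSeg_consHead, ← hslice]
      · rw [ih (ind + 1) fp bal splits (by omega) (by omega) (by omega),
          consSeg_consHead, ← hslice]
    · have hind : ind = tokens.length := by omega
      rw [and_split_go]
      simp only [dif_neg h]
      simp [hind, List.drop_of_length_le, segSpec, consSeg]

lemma and_split_eq_spec (tokens : List String) : and_split tokens = segSpec tokens 0 := by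
  unfold and_split
  rw [and_split_go_eq tokens tokens.length 0 0 0 [] (by omega) (le_refl _) (by omega)]
  have : PySem.List.slice tokens (some ((0 : Nat) : Int)) (some ((0 : Nat) : Int)) = [] := by
    rw [PySem.List.slice_natCast]; simp
  simp only [Nat.cast_zero] at this ⊢
  rw [show ((0:Int)) = ((0 : Nat) : Int) by simp] at *
  rw [this, List.drop_zero, consSeg_nil _ (segSpec_ne_nil _ _), List.nil_append]

-- firstCut_go shifts its index parameter
lemma firstCut_go_shift (ts : List String) : ∀ (bal : Int) (i : Nat),
    firstCut_go ts bal i = (firstCut_go ts bal 0).map (· + i) := by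
  induction ts with
  | nil => intro bal i; simp [firstCut_go]
  | cons t ts ih =>
    intro bal i
    simp only [firstCut_go]
    split_ifs
    · rw [ih (bal + 1) (i + 1), ih (bal + 1) 1]
      cases firstCut_go ts (bal + 1) 0 <;> simp <;> omega
    · rw [ih (bal - 1) (i + 1), ih (bal - 1) 1]
      cases firstCut_go ts (bal - 1) 0 <;> simp <;> omega
    · simp
    · rw [ih bal (i + 1), ih bal 1]
      cases firstCut_go ts bal 0 <;> simp <;> omega

-- firstCut characterises the head of segSpec
lemma firstCut_none (ts : List String) : ∀ (bal : Int),
    firstCut_go ts bal 0 = none → segSpec ts bal = [ts] := by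
  induction ts with
  | nil => intro bal _; simp [segSpec]
  | cons t ts ih =>
    intro bal h
    simp only [firstCut_go] at h
    simp only [segSpec]
    split_ifs at h ⊢ with h1 h2 h3
    · rw [firstCut_go_shift] at h
      cases hf : firstCut_go ts (bal + 1) 0 <;> rw [hf] at h <;> simp at h
      rw [ih (bal + 1) hf]; simp [consHead]
    · rw [firstCut_go_shift] at h
      cases hf : firstCut_go ts (bal - 1) 0 <;> rw [hf] at h <;> simp at h
      rw [ih (bal - 1) hf]; simp [consHead]
    · rw [firstCut_go_shift] at h
      cases hf : firstCut_go ts bal 0 <;> rw [hf] at h <;> simp at h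
      rw [ih bal hf]; simp [consHead]

lemma firstCut_some (ts : List String) : ∀ (bal : Int) (i : Nat),
    firstCut_go ts bal 0 = some i →
      segSpec ts bal = ts.take i :: segSpec (ts.drop (i + 1)) 0 := by
  induction ts with
  | nil => intro bal i h; simp [firstCut_go] at h
  | cons t ts ih =>
    intro bal i h
    simp only [firstCut_go] at h
    simp only [segSpec]
    split_ifs at h ⊢ with h1 h2 h3
    · rw [firstCut_go_shift] at h
      cases hf : firstCut_go ts (bal + 1) 0 with
      | none => rw [hf] at h; simp at h
      | some j =>
        rw [hf] at h; simp only [Option.map_some, Option.some.injEq] at h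
        subst h
        rw [ih (bal + 1) j hf]
        simp [consHead]
    · rw [firstCut_go_shift] at h
      cases hf : firstCut_go ts (bal - 1) 0 with
      | none => rw [hf] at h; simp at h
      | some j =>
        rw [hf] at h; simp only [Option.map_some, Option.some.injEq] at h
        subst h
        rw [ih (bal - 1) j hf]
        simp [consHead]
    · simp only [Option.some.injEq] at h
      subst h
      obtain ⟨-, rfl⟩ := h3
      simp
    · rw [firstCut_go_shift] at h
      cases hf : firstCut_go ts bal 0 with
      | none => rw [hf] at h; simp at h
      | some j =>
        rw [hf] at h; simp only [Option.map_some, Option.some.injEq] at h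
        subst h
        rw [ih bal j hf]
        simp [consHead]

-- B equals the canonical spec
lemma and_split_alt_go_eq :
    ∀ (n : Nat) (rest : List String), rest.length ≤ n →
      ∀ res, and_split_alt_go rest res = res ++ segSpec rest 0 := by
  intro n
  induction n with
  | zero =>
    intro rest hlen res
    have : rest = [] := List.eq_nil_of_length_eq_zero (by omega)
    subst this
    rw [and_split_alt_go]
    simp [firstCut, firstCut_go, segSpec]
  | succ n ih =>
    intro rest hlen res
    rw [and_split_alt_go]
    cases hfc : firstCut rest with
    | none => simp only []; rw [firstCut_none rest 0 hfc]
    | some i =>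
      simp only []
      have hlt := firstCut_go_lt rest 0 0 i hfc
      have hcast : ((i : Int) + 1) = ((i + 1 : Nat) : Int) := by push_cast; ring
      rw [hcast, PySem.List.slice_from_natCast, PySem.List.slice_to_natCast]
      rw [ih (rest.drop (i + 1)) (by simp; omega)]
      rw [firstCut_some rest 0 i hfc]
      simp

-- ===== VERDICT (by name: the statement is the Claim_ definition above) =====
theorem and_split_spec : Claim_equal_and_split := by
  intro tokens _
  unfold Spec_and_split and_split_alt
  rw [and_split_alt_go_eq tokens.length tokens (le_refl _) [], List.nil_append, and_split_eq_spec]
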